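-- pv_equiv track=rewrite | github.com/Haximilian/plot-scheduler | server.py | createConflictGraph
-- ===== SOURCE A (Python) =====
-- import collections
--
-- def createConflictGraph(schedule):
--   inv = collections.defaultdict(lambda:set())
--   for v, es in schedule.items():
--     for e in es:
--       inv[e].add(v)
--
--   conflictGraph = collections.defaultdict(lambda:set())
--   for v, es in schedule.items():
--     for e in es:
--       conflictGraph[v] = conflictGraph[v].union(inv[e])
--
--     conflictGraph[v].remove(v)
--
--   return conflictGraph
-- ===== SOURCE B (Python) =====
-- def createConflictGraph(schedule):
--   conflictGraph = {}
--   for v, es in schedule.items():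
--     conflicts = set()
--     for e in es:
--       for w, fs in schedule.items():
--         if w != v and e in fs:
--           conflicts.add(w)
--     conflictGraph[v] = conflicts
--   return conflictGraph
-- ===== Notes on version B (the rewrite author's own statement) =====
-- stated objective: alternative
-- what changed: B drops A's inverse event-to-vertices index entirely and computes each vertex's conflict set by a direct brute-force scan: for each of the vertex's events it scans the whole schedule for other vertices attending that event, adding them to a set.
import Mathlib
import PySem

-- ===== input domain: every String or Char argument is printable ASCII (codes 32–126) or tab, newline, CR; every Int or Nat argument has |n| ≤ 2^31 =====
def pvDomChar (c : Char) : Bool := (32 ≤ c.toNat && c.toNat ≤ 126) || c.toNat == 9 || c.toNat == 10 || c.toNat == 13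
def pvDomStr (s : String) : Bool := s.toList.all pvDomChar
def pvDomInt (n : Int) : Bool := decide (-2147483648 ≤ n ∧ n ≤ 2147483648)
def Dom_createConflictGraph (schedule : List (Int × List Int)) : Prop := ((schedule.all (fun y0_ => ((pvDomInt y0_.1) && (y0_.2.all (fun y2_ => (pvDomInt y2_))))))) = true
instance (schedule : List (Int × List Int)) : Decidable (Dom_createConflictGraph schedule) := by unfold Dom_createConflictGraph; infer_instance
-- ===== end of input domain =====

-- B drops A's inverse event→vertices index entirely and finds each vertex's conflicts by a direct
-- pairwise scan of the schedule (objective: alternative; B trades the index for nested scans);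
-- the equivalence is about return values (neither mutates its argument).

-- ===== PORT A =====
-- inv = defaultdict(set); for v, es in schedule.items(): for e in es: inv[e].add(v)
def pvInvA (schedule : List (Int × List Int)) : PySem.Dict Int (PySem.Set Int) :=
  (PySem.Dict.ofList schedule).items.foldl
    (fun inv p => p.2.foldl
      (fun inv e => inv.insert e (PySem.Set.add (inv.getD e PySem.Set.empty) p.1)) inv)
    PySem.Dict.empty

-- body of A's second loop: union inv[e] into conflictGraph[v] per event, then
-- conflictGraph[v].remove(v) — KeyError when v is absent (excluded by Pre_); exact when present
def pvStepA (inv : PySem.Dict Int (PySem.Set Int)) (cg : PySem.Dict Int (PySem.Set Int))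
    (p : Int × List Int) : PySem.Dict Int (PySem.Set Int) :=
  let cg2 := p.2.foldl
    (fun cg e => cg.insert p.1
      (PySem.Set.union (cg.getD p.1 PySem.Set.empty) (inv.getD e PySem.Set.empty))) cg
  match PySem.Set.remove? (cg2.getD p.1 PySem.Set.empty) p.1 with
  | some s => cg2.insert p.1 s
  | none => cg2.insert p.1 (cg2.getD p.1 PySem.Set.empty)

def createConflictGraph (schedule : List (Int × List Int)) : List (Int × List Int) :=
  ((PySem.Dict.ofList schedule).items.foldl (pvStepA (pvInvA schedule)) PySem.Dict.empty).items

-- ===== PORT B =====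
-- conflicts = set(); for e in es: for w, fs in schedule.items(): if w != v and e in fs: conflicts.add(w)
def pvValB (items : List (Int × List Int)) (p : Int × List Int) : PySem.Set Int :=
  p.2.foldl
    (fun conf e => items.foldl
      (fun conf q => if q.1 != p.1 && q.2.contains e then PySem.Set.add conf q.1 else conf)
      conf)
    PySem.Set.empty

-- conflictGraph = {}; for v, es in schedule.items(): … ; conflictGraph[v] = conflicts
def createConflictGraph_alt (schedule : List (Int × List Int)) : List (Int × List Int) :=
  ((PySem.Dict.ofList schedule).items.foldl
    (fun cg p => cg.insert p.1 (pvValB (PySem.Dict.ofList schedule).items p))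
    PySem.Dict.empty).items

-- ===== PRECONDITION & SPEC =====
-- Pre_ excludes exactly the inputs on which the Python A raises KeyError: a vertex whose event
-- list (after Python's dict construction collapses duplicate keys, last value winning) is empty.
def Pre_createConflictGraph (schedule : List (Int × List Int)) : Prop :=
  ∀ p ∈ (PySem.Dict.ofList schedule).items, p.2 ≠ []
instance (schedule : List (Int × List Int)) : Decidable (Pre_createConflictGraph schedule) := by
  unfold Pre_createConflictGraph; infer_instance

def pvWitness_createConflictGraph : (List (Int × List Int)) := [(1, [5]), (2, [5, 6]), (3, [6])]

def Spec_createConflictGraph (schedule : List (Int × List Int)) (out : List (Int × List Int)) : Prop := out = createConflictGraph_alt schedule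
instance (schedule : List (Int × List Int)) (out : List (Int × List Int)) : Decidable (Spec_createConflictGraph schedule out) := by unfold Spec_createConflictGraph; infer_instance

-- ===== CLAIM (what is proved, stated in full; the proofs are below) =====
def Claim_equal_createConflictGraph : Prop := ∀ (schedule : List (Int × List Int)), Dom_createConflictGraph schedule → Pre_createConflictGraph schedule → Spec_createConflictGraph schedule (createConflictGraph schedule)

-- ===== LEMMAS AND PROOFS =====

-- the vertices (in schedule order) attending event e
def pvByEvent (items : List (Int × List Int)) (e : Int) : List Int :=
  (items.filter (fun q => q.2.contains e)).map Prod.fst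

-- A's per-vertex value, extracted from pvStepA: the union loop over es, then the remove
def pvValA (inv : PySem.Dict Int (PySem.Set Int)) (p : Int × List Int) : PySem.Set Int :=
  let s := p.2.foldl (fun t e => PySem.Set.union t (inv.getD e PySem.Set.empty)) PySem.Set.empty
  match PySem.Set.remove? s p.1 with
  | some s' => s'
  | none => s

-- updating a set with the dedup of a list is updating it with the list itself
lemma pv_update_ofList (s : PySem.Set Int) (t : List Int) :
    PySem.Set.update s (PySem.Set.ofList t) = PySem.Set.update s t := by
  induction t using List.reverseRecOn generalizing s with
  | nil => simp [PySem.Set.ofList_nil]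
  | append_singleton t x ih =>
      rw [PySem.Set.ofList_append_singleton, PySem.Set.update_append,
          PySem.Set.update_cons, PySem.Set.update_nil]
      by_cases hx : x ∈ PySem.Set.ofList t
      · rw [PySem.Set.add_of_mem hx, ih,
            PySem.Set.add_of_mem (by rw [PySem.Set.mem_update]; exact Or.inr ((PySem.Set.mem_ofList t x).mp hx))]
      · rw [PySem.Set.add_of_not_mem hx, PySem.Set.update_append, PySem.Set.update_cons,
          PySem.Set.update_nil, ih]

-- a union loop over per-event deduped lists is one Set.update with the flattened lists
lemma pv_fold_union (L : Int → List Int) (es : List Int) (s : PySem.Set Int) :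
    es.foldl (fun t e => PySem.Set.union t (PySem.Set.ofList (L e))) s
      = PySem.Set.update s (es.flatMap L) := by
  induction es generalizing s with
  | nil => simp [PySem.Set.update_nil]
  | cons e es ih =>
      rw [List.foldl_cons, ih, List.flatMap_cons, PySem.Set.update_append]
      show PySem.Set.update (PySem.Set.update s (PySem.Set.ofList (L e))) _ = _
      rw [pv_update_ofList]

-- a loop of Set.update per event is one Set.update with the flattened lists
lemma pv_fold_update (L : Int → List Int) (es : List Int) (s : PySem.Set Int) :
    es.foldl (fun t e => PySem.Set.update t (L e)) s
      = PySem.Set.update s (es.flatMap L) := by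
  induction es generalizing s with
  | nil => simp [PySem.Set.update_nil]
  | cons e es ih => rw [List.foldl_cons, ih, List.flatMap_cons, PySem.Set.update_append]

-- A's inv inner loop: effect of registering v under every event of es on key e
lemma pv_invA_inner (v : Int) (es : List Int) :
    ∀ (d : PySem.Dict Int (PySem.Set Int)) (e : Int),
    (es.foldl (fun inv e' => inv.insert e' (PySem.Set.add (inv.getD e' PySem.Set.empty) v)) d).getD e PySem.Set.empty
      = if es.contains e then PySem.Set.add (d.getD e PySem.Set.empty) v else d.getD e PySem.Set.empty := by
  induction es with
  | nil => intro d e; simp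
  | cons e' es ih =>
      intro d e
      rw [List.foldl_cons, ih]
      by_cases he : e = e'
      · subst he
        rw [PySem.Dict.getD_insert_self]
        by_cases hm : es.contains e
        · simp
        · simp
      · rw [PySem.Dict.getD_insert_of_ne d _ _ he]
        simp [he]

-- A's inv outer loop: inv[e] collects (as a set) the vertices of the processed prefix attending e
lemma pv_invA_loop (l : List (Int × List Int)) :
    ∀ (d : PySem.Dict Int (PySem.Set Int)) (e : Int),
    (l.foldl (fun inv p => p.2.foldl
        (fun inv e' => inv.insert e' (PySem.Set.add (inv.getD e' PySem.Set.empty) p.1)) inv) d).getD e PySem.Set.empty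
      = PySem.Set.update (d.getD e PySem.Set.empty) (pvByEvent l e) := by
  induction l with
  | nil => intro d e; simp [pvByEvent, PySem.Set.update_nil]
  | cons p l ih =>
      intro d e
      rw [List.foldl_cons, ih]
      by_cases hc : p.2.contains e
      · rw [pv_invA_inner, if_pos hc]
        simp only [pvByEvent, List.filter_cons, hc]
        rfl
      · rw [pv_invA_inner, if_neg (by simpa using hc)]
        have he2 : e ∉ p.2 := by simpa using hc
        simp [pvByEvent, he2]

-- the inv dictionary built by A, at every key
lemma pv_invA_getD (schedule : List (Int × List Int)) (e : Int) :
    (pvInvA schedule).getD e PySem.Set.empty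
      = PySem.Set.ofList (pvByEvent (PySem.Dict.ofList schedule).items e) := by
  unfold pvInvA
  rw [pv_invA_loop]
  simp [PySem.Set.update_nil_left]

-- A's inner union loop only ever rewrites key v of the conflict dict
lemma pv_innerA (inv : PySem.Dict Int (PySem.Set Int)) (v : Int) (es : List Int) :
    ∀ (cg : PySem.Dict Int (PySem.Set Int)) (s : PySem.Set Int),
    es.foldl (fun cg e => cg.insert v
        (PySem.Set.union (cg.getD v PySem.Set.empty) (inv.getD e PySem.Set.empty)))
      (cg.insert v s)
      = cg.insert v (es.foldl (fun t e => PySem.Set.union t (inv.getD e PySem.Set.empty)) s) := by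
  induction es with
  | nil => intro cg s; rfl
  | cons e es ih =>
      intro cg s
      rw [List.foldl_cons, PySem.Dict.getD_insert_self, PySem.Dict.insert_insert_self,
        ih cg (PySem.Set.union s (inv.getD e PySem.Set.empty)), List.foldl_cons]

-- A's loop body inserts pvValA at a fresh key
lemma pv_stepA_fresh (inv : PySem.Dict Int (PySem.Set Int)) (cg : PySem.Dict Int (PySem.Set Int))
    (p : Int × List Int) (h : cg.contains p.1 = false) :
    pvStepA inv cg p = cg.insert p.1 (pvValA inv p) := by
  obtain ⟨v, es⟩ := p
  cases es with
  | nil =>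
      have hd : cg.getD v PySem.Set.empty = PySem.Set.empty :=
        PySem.Dict.getD_of_not_contains cg PySem.Set.empty h
      simp only [pvStepA, pvValA, List.foldl_nil, hd]
      rfl
  | cons e es =>
      simp only [pvStepA, pvValA, List.foldl_cons]
      rw [PySem.Dict.getD_of_not_contains cg PySem.Set.empty h]
      rw [pv_innerA inv v es cg (PySem.Set.union PySem.Set.empty (inv.getD e PySem.Set.empty))]
      rw [PySem.Dict.getD_insert_self]
      cases hrem : PySem.Set.remove?
          (es.foldl (fun t e => PySem.Set.union t (inv.getD e PySem.Set.empty))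
            (PySem.Set.union PySem.Set.empty (inv.getD e PySem.Set.empty))) v with
      | some s' => simp [PySem.Dict.insert_insert_self]
      | none => simp [PySem.Dict.insert_insert_self]

-- a fold whose body inserts a dict-independent value at a fresh key appends its items
lemma pv_items_fold {ν : Type} (val : Int × List Int → ν)
    (step : PySem.Dict Int ν → Int × List Int → PySem.Dict Int ν)
    (hstep : ∀ cg p, cg.contains p.1 = false → step cg p = cg.insert p.1 (val p)) :
    ∀ (l : List (Int × List Int)) (cg : PySem.Dict Int ν),
      (l.map Prod.fst).Nodup → (∀ p ∈ l, cg.contains p.1 = false) →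
      (l.foldl step cg).items = cg.items ++ l.map (fun p => (p.1, val p)) := by
  intro l
  induction l with
  | nil => intro cg _ _; simp
  | cons p l ih =>
      intro cg hnd hfresh
      have h0 : cg.contains p.1 = false := hfresh p (List.mem_cons_self)
      rw [List.foldl_cons, hstep cg p h0]
      have hnd' : (l.map Prod.fst).Nodup := by
        simpa using hnd.of_cons
      have hnotmem : p.1 ∉ l.map Prod.fst := by
        have := List.nodup_cons.mp (by simpa using hnd : (p.1 :: l.map Prod.fst).Nodup)
        exact this.1
      rw [ih (cg.insert p.1 (val p)) hnd' ?_]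
      · rw [PySem.Dict.items_insert_of_not_contains cg (val p) h0]
        simp
      · intro q hq
        rw [PySem.Dict.contains_insert]
        have : q.1 ≠ p.1 := by
          intro he; exact hnotmem (he ▸ List.mem_map_of_mem hq)
        simp [this, hfresh q (List.mem_cons_of_mem p hq)]

-- dedup (Set.ofList) commutes with filtering
lemma pv_filter_ofList (p : Int → Bool) (L : List Int) :
    PySem.Set.ofList (L.filter p) = List.filter p (PySem.Set.ofList L) := by
  induction L using List.reverseRecOn with
  | nil => rfl
  | append_singleton L x ih =>
      rw [List.filter_append, PySem.Set.ofList_append_singleton]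
      by_cases hpx : p x = true
      · have hfx : List.filter p [x] = [x] := by simp [hpx]
        rw [hfx, PySem.Set.ofList_append_singleton, ih]
        by_cases hm : x ∈ PySem.Set.ofList L
        · rw [PySem.Set.add_of_mem hm,
              PySem.Set.add_of_mem (List.mem_filter.mpr ⟨hm, hpx⟩)]
        · rw [PySem.Set.add_of_not_mem hm,
              PySem.Set.add_of_not_mem (fun hc => hm (List.mem_filter.mp hc).1),
              List.filter_append]
          simp [hpx]
      · have hfx : List.filter p [x] = [] := by simp [hpx]
        rw [hfx, List.append_nil, ih]
        by_cases hm : x ∈ PySem.Set.ofList L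
        · rw [PySem.Set.add_of_mem hm]
        · rw [PySem.Set.add_of_not_mem hm, List.filter_append]
          simp [hpx]

-- discarding v from set(L) is set(L with v filtered out)
lemma pv_discard_ofList (L : List Int) (v : Int) :
    PySem.Set.discard (PySem.Set.ofList L) v = PySem.Set.ofList (L.filter (fun w => w != v)) := by
  rw [pv_filter_ofList]
  rfl

-- B's inner scan over the schedule is one Set.update with the matching vertices of that event
lemma pv_innerB (items : List (Int × List Int)) (v e : Int) (conf : PySem.Set Int) :
    items.foldl
        (fun conf q => if q.1 != v && q.2.contains e then PySem.Set.add conf q.1 else conf) conf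
      = PySem.Set.update conf ((pvByEvent items e).filter (fun w => w != v)) := by
  induction items generalizing conf with
  | nil => simp [pvByEvent, PySem.Set.update_nil]
  | cons q items ih =>
      rw [List.foldl_cons, ih]
      have hBE : pvByEvent (q :: items) e
          = if q.2.contains e then q.1 :: pvByEvent items e else pvByEvent items e := by
        simp only [pvByEvent, List.filter_cons]
        split_ifs <;> simp
      rw [hBE]
      by_cases hc : q.2.contains e = true
      · rw [if_pos hc, List.filter_cons]
        by_cases hv : q.1 = v
        · have hb : (q.1 != v) = false := by simp [hv]
          rw [hb, hc, Bool.and_true]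
          simp
        · have hb : (q.1 != v) = true := by simpa using hv
          have hcond : (q.1 != v && q.2.contains e) = true := by rw [hb, hc]; rfl
          rw [if_pos hcond, if_pos hb, PySem.Set.update_cons]
      · have hc' : q.2.contains e = false := by simpa using hc
        rw [if_neg hc, hc', Bool.and_false]
        simp

-- filtering v out commutes with flattening the per-event vertex lists
lemma pv_flatMap_filter (es : List Int) (L : Int → List Int) (v : Int) :
    es.flatMap (fun e => (L e).filter (fun w => w != v))
      = (es.flatMap L).filter (fun w => w != v) := by
  induction es with
  | nil => rfl
  | cons e es ih => rw [List.flatMap_cons, List.flatMap_cons, List.filter_append, ih]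

-- B's per-vertex value in closed form
lemma pv_valB_eq (items : List (Int × List Int)) (p : Int × List Int) :
    pvValB items p
      = PySem.Set.ofList ((p.2.flatMap (pvByEvent items)).filter (fun w => w != p.1)) := by
  unfold pvValB
  have h1 : ∀ conf, p.2.foldl
      (fun conf e => items.foldl
        (fun conf q => if q.1 != p.1 && q.2.contains e then PySem.Set.add conf q.1 else conf) conf)
      conf
      = p.2.foldl (fun conf e =>
          PySem.Set.update conf ((pvByEvent items e).filter (fun w => w != p.1))) conf := by
    intro conf
    exact PySem.List.foldl_congr_mem _ _ _ conf (fun acc e _ => pv_innerB items p.1 e acc)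
  rw [h1, pv_fold_update, pv_flatMap_filter]
  exact PySem.Set.update_nil_left _

-- the per-vertex values coincide for a vertex with a nonempty event list
lemma pv_val_eq (schedule : List (Int × List Int)) (p : Int × List Int)
    (hp : p ∈ (PySem.Dict.ofList schedule).items) (hne : p.2 ≠ []) :
    pvValA (pvInvA schedule) p = pvValB (PySem.Dict.ofList schedule).items p := by
  unfold pvValA
  have hS : p.2.foldl (fun t e => PySem.Set.union t ((pvInvA schedule).getD e PySem.Set.empty)) PySem.Set.empty
      = PySem.Set.ofList (p.2.flatMap (pvByEvent (PySem.Dict.ofList schedule).items)) := by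
    simp only [pv_invA_getD schedule]
    rw [pv_fold_union (pvByEvent (PySem.Dict.ofList schedule).items) p.2 PySem.Set.empty]
    exact PySem.Set.update_nil_left _
  rw [hS]
  set L := p.2.flatMap (pvByEvent (PySem.Dict.ofList schedule).items) with hL
  show (match (PySem.Set.ofList L).remove? p.1 with
        | some s' => s'
        | none => PySem.Set.ofList L) = pvValB (PySem.Dict.ofList schedule).items p
  have hvmem : p.1 ∈ PySem.Set.ofList L := by
    rw [PySem.Set.mem_ofList, hL]
    cases hx : p.2 with
    | nil => exact absurd hx hne
    | cons e0 es0 =>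
        refine List.mem_flatMap.mpr ⟨e0, List.mem_cons_self, ?_⟩
        exact List.mem_map_of_mem (List.mem_filter.mpr ⟨hp, by show p.2.contains e0 = true; rw [hx]; simp⟩)
  rw [PySem.Set.remove?_of_mem hvmem, pv_valB_eq, pv_discard_ofList]

-- ===== VERDICT (by name: the statement is the Claim_ definition above) =====
theorem createConflictGraph_spec : Claim_equal_createConflictGraph := by
  intro schedule _ hpre
  unfold Spec_createConflictGraph createConflictGraph createConflictGraph_alt
  have hnd : (((PySem.Dict.ofList schedule).items).map Prod.fst).Nodup := by
    have h := PySem.Dict.nodup_keys_ofList (ν := List Int) schedule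
    simpa [PySem.Dict.keys] using h
  have hfresh : ∀ p ∈ (PySem.Dict.ofList schedule).items,
      (PySem.Dict.empty : PySem.Dict Int (PySem.Set Int)).contains p.1 = false := by
    intro p _; exact PySem.Dict.contains_empty p.1
  rw [pv_items_fold (pvValA (pvInvA schedule)) (pvStepA (pvInvA schedule))
        (fun cg p h => pv_stepA_fresh (pvInvA schedule) cg p h)
        (PySem.Dict.ofList schedule).items PySem.Dict.empty hnd hfresh,
      pv_items_fold (pvValB (PySem.Dict.ofList schedule).items)
        (fun cg p => cg.insert p.1 (pvValB (PySem.Dict.ofList schedule).items p))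
        (fun cg p _ => rfl)
        (PySem.Dict.ofList schedule).items PySem.Dict.empty hnd hfresh]
  exact congrArg _ (List.map_congr_left (fun p hp => by
    rw [pv_val_eq schedule p hp (hpre p hp)]))
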